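-- pv_equiv track=rewrite | github.com/richardtinner/AOC-2024 | day22.py | generate_secrets
-- ===== SOURCE A (Python) =====
-- def mix(secret, value):
--     return value ^ secret
--
-- def prune(secret):
--     return secret % 16777216
--
-- def generate_secrets(initial, num = 2000):
--     secret = initial
--     secrets = [(secret, secret % 10, -99)]
--     for i in range(0, num):
--         previous_secret = secret
--
--         # Step 1
--         next = secret * 64
--         secret = mix(secret, next)
--         secret = prune(secret)
--
--         # Step 2
--         next = int(secret / 32)
--         secret = mix(secret, next)
--         secret = prune(secret)
--
--         # Step 3
--         next = secret * 2048
--         secret = mix(secret, next)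
--         secret = prune(secret)
--
--         secrets.append((secret, secret % 10, (secret % 10) - (previous_secret % 10)))
--
--     return secrets
--
-- secrets = []
-- ===== SOURCE B (Python) =====
-- # Table-driven reimplementation: the per-step map s -> prune(mix(...)) three times
-- # is GF(2)-linear on the 24-bit state (xor, shifts and masking all distribute over xor,
-- # and the map sends 0 to 0), so next(s) = _T0[low byte] ^ _T1[mid byte] ^ _T2[high byte]
-- # with three 256-entry tables precomputed once from the linear map on each byte slice.
--
-- def _lin(s):
--     s = (s ^ (s << 6)) & 0xFFFFFF
--     s = s ^ (s >> 5)          # s < 2**24, so int(s / 32) == s >> 5 exactly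
--     return (s ^ (s << 11)) & 0xFFFFFF
--
-- _T0 = [_lin(b) for b in range(256)]
-- _T1 = [_lin(b << 8) for b in range(256)]
-- _T2 = [_lin(b << 16) for b in range(256)]
--
-- def generate_secrets(initial, num=2000):
--     out = [(initial, initial % 10, -99)]
--     prev_price = initial % 10
--     s = initial % 16777216    # the step only depends on the low 24 bits
--     for _ in range(num):
--         s = _T0[s & 255] ^ _T1[(s >> 8) & 255] ^ _T2[s >> 16]
--         price = s % 10
--         out.append((s, price, price - prev_price))
--         prev_price = price
--     return out
-- ===== Notes on version B (the rewrite author's own statement) =====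
-- stated objective: faster
-- what changed: B exploits that the 24-bit step map is GF(2)-linear and precomputes three 256-entry byte tables once, so each iteration is three table lookups xored together instead of A's multiply/xor/mod/float-divide chain.
import Mathlib
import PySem

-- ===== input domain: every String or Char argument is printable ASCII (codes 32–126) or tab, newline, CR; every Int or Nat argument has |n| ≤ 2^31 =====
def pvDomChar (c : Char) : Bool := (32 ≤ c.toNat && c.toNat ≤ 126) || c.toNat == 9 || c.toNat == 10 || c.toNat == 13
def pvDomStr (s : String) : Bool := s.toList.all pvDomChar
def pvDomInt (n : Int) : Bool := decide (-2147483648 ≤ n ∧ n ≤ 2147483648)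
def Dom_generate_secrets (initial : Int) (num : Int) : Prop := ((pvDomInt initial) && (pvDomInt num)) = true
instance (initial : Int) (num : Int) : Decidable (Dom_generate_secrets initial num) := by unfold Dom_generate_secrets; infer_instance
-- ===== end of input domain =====

-- B replaces A's per-step arithmetic (multiply/xor/mod three times per iteration) by a
-- table-driven step: the 24-bit update is GF(2)-linear, so three precomputed 256-entry
-- tables give the next secret as T0[low byte] ^ T1[mid byte] ^ T2[high byte].

-- ===== PORT A =====
def pvMixA (secret value : Int) : Int := PySem.Int.bxor value secret

def pvPruneA (secret : Int) : Int := PySem.Int.mod secret 16777216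

-- one iteration of A's loop body over the state (secret, secrets)
-- (int(secret / 32) is PySem.Int.truncdiv, exact since |secret| < 2^24 < 2^53 there)
def pvBodyA (st : Int × List (Int × Int × Int)) (_i : Int) : Int × List (Int × Int × Int) :=
  let secret := st.1
  let previous_secret := secret
  let next1 := secret * 64
  let s1 := pvPruneA (pvMixA secret next1)
  let next2 := PySem.Int.truncdiv s1 32
  let s2 := pvPruneA (pvMixA s1 next2)
  let next3 := s2 * 2048
  let s3 := pvPruneA (pvMixA s2 next3)
  (s3, st.2 ++ [(s3, PySem.Int.mod s3 10, PySem.Int.mod s3 10 - PySem.Int.mod previous_secret 10)])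

def generate_secrets (initial : Int) (num : Int) : List (Int × Int × Int) :=
  ((PySem.List.pyRange 0 num 1).foldl pvBodyA
    (initial, [(initial, PySem.Int.mod initial 10, -99)])).2

-- ===== PORT B =====
-- _lin: the per-step map restricted to [0, 2^24), written with shifts and masks
def pvLinB (s0 : Int) : Int :=
  let s1 := PySem.Int.band (PySem.Int.bxor s0 (s0 <<< (6 : Nat))) 16777215
  let s2 := PySem.Int.bxor s1 (s1 >>> (5 : Nat))
  PySem.Int.band (PySem.Int.bxor s2 (s2 <<< (11 : Nat))) 16777215

def pvT0 : List Int := (PySem.List.pyRange 0 256 1).map (fun b => pvLinB b)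
def pvT1 : List Int := (PySem.List.pyRange 0 256 1).map (fun (b : Int) => pvLinB (b <<< (8 : Nat)))
def pvT2 : List Int := (PySem.List.pyRange 0 256 1).map (fun (b : Int) => pvLinB (b <<< (16 : Nat)))

-- _T0[s & 255] ^ _T1[(s >> 8) & 255] ^ _T2[s >> 16]; the indices are always in
-- [0, 256), so Python's plain indexing never raises and is ported as pyGetD
def pvStepTab (s : Int) : Int :=
  PySem.Int.bxor
    (PySem.Int.bxor (PySem.List.pyGetD pvT0 (PySem.Int.band s 255) 0)
      (PySem.List.pyGetD pvT1 (PySem.Int.band (s >>> (8 : Nat)) 255) 0))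
    (PySem.List.pyGetD pvT2 (s >>> (16 : Nat)) 0)

-- the for-loop of B with state (s, prev_price, out)
def pvLoopB : Nat → Int → Int → List (Int × Int × Int) → List (Int × Int × Int)
  | 0, _, _, out => out
  | n + 1, s, prev_price, out =>
    let t := pvStepTab s
    let price := PySem.Int.mod t 10
    pvLoopB n t price (out ++ [(t, price, price - prev_price)])

def generate_secrets_alt (initial : Int) (num : Int) : List (Int × Int × Int) :=
  pvLoopB num.toNat (PySem.Int.mod initial 16777216) (PySem.Int.mod initial 10)
    [(initial, PySem.Int.mod initial 10, -99)]

-- ===== PRECONDITION & SPEC =====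
def Spec_generate_secrets (initial : Int) (num : Int) (out : List (Int × Int × Int)) : Prop := out = generate_secrets_alt initial num
instance (initial : Int) (num : Int) (out : List (Int × Int × Int)) : Decidable (Spec_generate_secrets initial num out) := by unfold Spec_generate_secrets; infer_instance

-- ===== CLAIM (what is proved, stated in full; the proofs are below) =====
def Claim_equal_generate_secrets : Prop := ∀ (initial : Int) (num : Int), Dom_generate_secrets initial num → Spec_generate_secrets initial num (generate_secrets initial num)

-- ===== LEMMAS AND PROOFS =====

-- the per-step map on Nat, in the shape of pvLinB
def natLin (x : Nat) : Nat :=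
  let a := (x ^^^ (x <<< 6)) &&& 16777215
  let b := a ^^^ (a >>> 5)
  (b ^^^ (b <<< 11)) &&& 16777215

-- bit complement within k bits: x ^^^ (2^k - 1) = 2^k - 1 - x
theorem pvXorC (k x : Nat) (h : x < 2^k) : x ^^^ (2^k - 1) = 2^k - 1 - x := by
  induction k generalizing x with
  | zero => interval_cases x; rfl
  | succ k ih =>
    have hp : 2^(k+1) = 2^k * 2 := pow_succ 2 k
    have h1 : 1 ≤ 2^k := Nat.one_le_two_pow
    have hm2 : (2^(k+1) - 1) % 2 = 1 := by omega
    have hd2 : (2^(k+1) - 1) / 2 = 2^k - 1 := by omega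
    have hsplit : x ^^^ (2^(k+1)-1)
        = 2*((x ^^^ (2^(k+1)-1)) / 2) + (x ^^^ (2^(k+1)-1)) % 2 := by omega
    have hdiv : (x ^^^ (2^(k+1)-1)) / 2 = x/2 ^^^ (2^k - 1) := by
      have := Nat.shiftRight_xor_distrib (a := x) (b := 2^(k+1)-1) (i := 1)
      simpa [Nat.shiftRight_succ, hd2] using this
    have hmod : (x ^^^ (2^(k+1)-1)) % 2 = x % 2 ^^^ 1 := by
      have := Nat.xor_mod_two_pow (a := x) (b := 2^(k+1)-1) (n := 1)
      simpa [hm2] using this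
    have hih := ih (x/2) (by omega)
    have hx2 : x % 2 ^^^ 1 = 1 - x % 2 := by
      rcases Nat.mod_two_eq_zero_or_one x with h'|h' <;> simp [h']
    rw [hsplit, hdiv, hmod, hih, hx2]
    omega

-- xor with disjoint high bits is addition
theorem pvXorD (k a b : Nat) (h : a < 2^k) : a ^^^ (b * 2^k) = a + b * 2^k := by
  induction k generalizing a b with
  | zero => interval_cases a; simp
  | succ k ih =>
    have hp : 2^(k+1) = 2^k * 2 := pow_succ 2 k
    have hsplit : a ^^^ (b * 2^(k+1))
        = 2*((a ^^^ (b*2^(k+1)))/2) + (a ^^^ (b*2^(k+1)))%2 := by omega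
    have he : b * 2^(k+1) = (b * 2^k) * 2 := by rw [hp]; ring
    have hd : (b * 2^(k+1)) / 2 = b * 2^k := by omega
    have hdiv : (a ^^^ (b*2^(k+1)))/2 = a/2 ^^^ (b * 2^k) := by
      have := Nat.shiftRight_xor_distrib (a := a) (b := b*2^(k+1)) (i := 1)
      simpa [Nat.shiftRight_succ, hd] using this
    have hm : (b * 2^(k+1)) % 2 = 0 := by omega
    have hmod : (a ^^^ (b*2^(k+1)))%2 = a % 2 := by
      have := Nat.xor_mod_two_pow (a := a) (b := b*2^(k+1)) (n := 1)
      simpa [hm] using this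
    have hih := ih (a/2) b (by omega)
    rw [hsplit, hdiv, hmod, hih]
    omega

theorem pvXmod (u v : Nat) : (u ^^^ v) % 16777216 = u % 16777216 ^^^ v % 16777216 := by
  have hM : (16777216:Nat) = 2^24 := by norm_num
  rw [hM, Nat.xor_mod_two_pow]

theorem pvXcomp (z : Nat) (h : z < 16777216) : z ^^^ 16777215 = 16777215 - z := by
  have := pvXorC 24 z (by norm_num; omega)
  norm_num at this
  exact this

-- low 24 bits of a Python xor depend only on the low 24 bits of the arguments
theorem pvBxorEmod (a b : Int) :
    (PySem.Int.bxor a b) % 16777216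
      = (((a % 16777216).toNat ^^^ (b % 16777216).toNat : Nat) : Int) := by
  have castmod : ∀ w : Nat, ((w:Int)) % 16777216 = ((w % 16777216 : Nat) : Int) := by
    intro w; omega
  have negmod : ∀ w : Nat,
      ((-(w:Int) - 1)) % 16777216 = ((16777215 - w % 16777216 : Nat) : Int) := by
    intro w; omega
  have hlt : ∀ w : Nat, w % 16777216 < 16777216 := fun w => Nat.mod_lt _ (by norm_num)
  have hxlt : ∀ u v : Nat, u % 16777216 ^^^ v % 16777216 < 16777216 := by
    intro u v
    have hM : (16777216:Nat) = 2^24 := by norm_num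
    rw [hM]
    exact Nat.xor_lt_two_pow (by rw [← hM]; exact hlt u) (by rw [← hM]; exact hlt v)
  unfold PySem.Int.bxor
  split_ifs with h1 h2 h2
  · have e1 : (a % 16777216).toNat = a.toNat % 16777216 := by omega
    have e2 : (b % 16777216).toNat = b.toNat % 16777216 := by omega
    rw [castmod, pvXmod, e1, e2]
  · have e1 : (a % 16777216).toNat = a.toNat % 16777216 := by omega
    have e2 : (b % 16777216).toNat = 16777215 - (-b - 1).toNat % 16777216 := by omega
    rw [negmod, pvXmod, e1, e2]
    congr 1
    rw [← pvXcomp (a.toNat % 16777216 ^^^ (-b - 1).toNat % 16777216) (hxlt _ _),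
        ← pvXcomp ((-b - 1).toNat % 16777216) (hlt _), Nat.xor_assoc]
  · have e1 : (a % 16777216).toNat = 16777215 - (-a - 1).toNat % 16777216 := by omega
    have e2 : (b % 16777216).toNat = b.toNat % 16777216 := by omega
    rw [negmod, pvXmod, e1, e2]
    congr 1
    rw [← pvXcomp ((-a - 1).toNat % 16777216 ^^^ b.toNat % 16777216) (hxlt _ _),
        ← pvXcomp ((-a - 1).toNat % 16777216) (hlt _)]
    simp [Nat.xor_comm, Nat.xor_left_comm]
  · have e1 : (a % 16777216).toNat = 16777215 - (-a - 1).toNat % 16777216 := by omega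
    have e2 : (b % 16777216).toNat = 16777215 - (-b - 1).toNat % 16777216 := by omega
    rw [castmod, pvXmod, e1, e2,
        ← pvXcomp ((-a - 1).toNat % 16777216) (hlt _),
        ← pvXcomp ((-b - 1).toNat % 16777216) (hlt _)]
    simp [Nat.xor_comm, Nat.xor_left_comm]

-- the three stages of natLin are xor-linear
theorem pvStageShl (c m x y : Nat) :
    ((x ^^^ y) ^^^ ((x ^^^ y) <<< c)) &&& m
      = ((x ^^^ (x <<< c)) &&& m) ^^^ ((y ^^^ (y <<< c)) &&& m) := by
  rw [Nat.shiftLeft_xor_distrib, ← Nat.and_xor_distrib_right]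
  congr 1
  simp [Nat.xor_comm, Nat.xor_left_comm]

theorem pvStageShr (c x y : Nat) :
    (x ^^^ y) ^^^ ((x ^^^ y) >>> c) = (x ^^^ (x >>> c)) ^^^ (y ^^^ (y >>> c)) := by
  rw [Nat.shiftRight_xor_distrib]
  simp [Nat.xor_comm, Nat.xor_left_comm]

def pvF1 (x : Nat) : Nat := (x ^^^ (x <<< 6)) &&& 16777215
def pvF2 (x : Nat) : Nat := x ^^^ (x >>> 5)
def pvF3 (x : Nat) : Nat := (x ^^^ (x <<< 11)) &&& 16777215

theorem natLin_eq_comp (x : Nat) : natLin x = pvF3 (pvF2 (pvF1 x)) := rfl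

theorem pvF1_xor (x y : Nat) : pvF1 (x ^^^ y) = pvF1 x ^^^ pvF1 y := pvStageShl 6 16777215 x y
theorem pvF2_xor (x y : Nat) : pvF2 (x ^^^ y) = pvF2 x ^^^ pvF2 y := pvStageShr 5 x y
theorem pvF3_xor (x y : Nat) : pvF3 (x ^^^ y) = pvF3 x ^^^ pvF3 y := pvStageShl 11 16777215 x y

theorem natLin_xor (x y : Nat) : natLin (x ^^^ y) = natLin x ^^^ natLin y := by
  rw [natLin_eq_comp, natLin_eq_comp, natLin_eq_comp, pvF1_xor, pvF2_xor, pvF3_xor]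

theorem natLin_lt (x : Nat) : natLin x < 16777216 := by
  unfold natLin
  simp only
  have := Nat.and_le_right (n := ((((x ^^^ x <<< 6) &&& 16777215) ^^^ ((x ^^^ x <<< 6) &&& 16777215) >>> 5) ^^^ (((x ^^^ x <<< 6) &&& 16777215) ^^^ ((x ^^^ x <<< 6) &&& 16777215) >>> 5) <<< 11)) (m := 16777215)
  omega

-- byte decomposition: for m < 2^24 the three byte slices xor back to m
theorem pvBytes (m : Nat) (_hm : m < 16777216) :
    (m % 256 ^^^ (m / 256 % 256) <<< 8) ^^^ (m / 65536) <<< 16 = m := by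
  have h8 : m % 256 < 2^8 := by omega
  have e1 : (m / 256 % 256) <<< 8 = (m / 256 % 256) * 2^8 := Nat.shiftLeft_eq _ _
  have e2 : (m / 65536) <<< 16 = (m / 65536) * 2^16 := Nat.shiftLeft_eq _ _
  rw [e1, pvXorD 8 _ _ h8, e2, pvXorD 16 _ _ (by norm_num; omega)]
  norm_num
  omega

-- pvLinB on a Nat cast is natLin
theorem pvLinB_natCast (x : Nat) : pvLinB ((x:Nat) : Int) = ((natLin x : Nat) : Int) := by
  unfold pvLinB natLin
  simp only
  have s6 : ((x:Int) <<< (6:Nat)) = ((x <<< 6 : Nat) : Int) := rfl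
  rw [s6]
  have b1 : PySem.Int.bxor (x:Int) ((x <<< 6 : Nat) : Int) = ((x ^^^ x <<< 6 : Nat) : Int) := by
    have := PySem.Int.bxor_natCast x (x <<< 6); simpa using this
  rw [b1]
  have a1 : PySem.Int.band (((x ^^^ x <<< 6 : Nat) : Int)) 16777215
      = (((x ^^^ x <<< 6) &&& 16777215 : Nat) : Int) := by
    have := PySem.Int.band_natCast (x ^^^ x <<< 6) 16777215; simpa using this
  rw [a1]
  set y : Nat := (x ^^^ x <<< 6) &&& 16777215 with hy
  have s5 : (((y:Nat):Int) >>> (5:Nat)) = ((y >>> 5 : Nat) : Int) := rfl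
  rw [s5]
  have b2 : PySem.Int.bxor ((y:Nat):Int) ((y >>> 5 : Nat) : Int) = ((y ^^^ y >>> 5 : Nat) : Int) := by
    have := PySem.Int.bxor_natCast y (y >>> 5); simpa using this
  rw [b2]
  set z : Nat := y ^^^ y >>> 5 with hz
  have s11 : (((z:Nat):Int) <<< (11:Nat)) = ((z <<< 11 : Nat) : Int) := rfl
  rw [s11]
  have b3 : PySem.Int.bxor ((z:Nat):Int) ((z <<< 11 : Nat) : Int) = ((z ^^^ z <<< 11 : Nat) : Int) := by
    have := PySem.Int.bxor_natCast z (z <<< 11); simpa using this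
  rw [b3]
  have := PySem.Int.band_natCast (z ^^^ z <<< 11) 16777215
  simpa using this

-- the table step on an in-range cast computes natLin
theorem pvStepTab_natCast (m : Nat) (hm : m < 16777216) :
    pvStepTab ((m:Nat) : Int) = ((natLin m : Nat) : Int) := by
  unfold pvStepTab pvT0 pvT1 pvT2
  have hband : PySem.Int.band ((m:Nat):Int) 255 = ((m &&& 255 : Nat) : Int) := by
    have := PySem.Int.band_natCast m 255; simpa using this
  have hshr8 : (((m:Nat):Int) >>> (8:Nat)) = ((m >>> 8 : Nat) : Int) := rfl
  have hband8 : PySem.Int.band ((m >>> 8 : Nat) : Int) 255 = ((m >>> 8 &&& 255 : Nat) : Int) := by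
    have := PySem.Int.band_natCast (m >>> 8) 255; simpa using this
  have hshr16 : (((m:Nat):Int) >>> (16:Nat)) = ((m >>> 16 : Nat) : Int) := rfl
  rw [hband, hshr8, hband8, hshr16]
  have hlt0 : (m &&& 255 : Nat) < 256 := by have := Nat.and_le_right (n := m) (m := 255); omega
  have hlt1 : (m >>> 8 &&& 255 : Nat) < 256 := by
    have := Nat.and_le_right (n := m >>> 8) (m := 255); omega
  have hlt2 : (m >>> 16 : Nat) < 256 := by
    have := Nat.shiftRight_eq_div_pow m 16; norm_num at this; omega
  rw [PySem.List.pyGetD_map_pyRange_of_nonneg _ 256 _ 0 (by positivity) (by exact_mod_cast hlt0),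
      PySem.List.pyGetD_map_pyRange_of_nonneg _ 256 _ 0 (by positivity) (by exact_mod_cast hlt1),
      PySem.List.pyGetD_map_pyRange_of_nonneg _ 256 _ 0 (by positivity) (by exact_mod_cast hlt2)]
  have c8 : (((m >>> 8 &&& 255 : Nat) : Int) <<< (8:Nat)) = (((m >>> 8 &&& 255) <<< 8 : Nat) : Int) := rfl
  have c16 : (((m >>> 16 : Nat) : Int) <<< (16:Nat)) = (((m >>> 16) <<< 16 : Nat) : Int) := rfl
  rw [c8, c16, pvLinB_natCast, pvLinB_natCast, pvLinB_natCast]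
  have bx1 : PySem.Int.bxor ((natLin (m &&& 255) : Nat) : Int) ((natLin ((m >>> 8 &&& 255) <<< 8) : Nat) : Int)
      = ((natLin (m &&& 255) ^^^ natLin ((m >>> 8 &&& 255) <<< 8) : Nat) : Int) := by
    simp
  rw [bx1]
  have bx2 : PySem.Int.bxor ((natLin (m &&& 255) ^^^ natLin ((m >>> 8 &&& 255) <<< 8) : Nat) : Int) ((natLin ((m >>> 16) <<< 16) : Nat) : Int)
      = (((natLin (m &&& 255) ^^^ natLin ((m >>> 8 &&& 255) <<< 8)) ^^^ natLin ((m >>> 16) <<< 16) : Nat) : Int) := by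
    simp
  rw [bx2]
  congr 1
  rw [← natLin_xor, ← natLin_xor]
  congr 1
  have e0 : m &&& 255 = m % 256 := by
    have := Nat.and_two_pow_sub_one_eq_mod m 8; norm_num at this; exact this
  have e1 : m >>> 8 &&& 255 = m / 256 % 256 := by
    have h1 := Nat.and_two_pow_sub_one_eq_mod (m >>> 8) 8
    have h2 := Nat.shiftRight_eq_div_pow m 8
    norm_num at h1 h2; rw [h1, h2]
  have e2 : m >>> 16 = m / 65536 := by
    have := Nat.shiftRight_eq_div_pow m 16; norm_num at this; exact this
  rw [e0, e1, e2, pvBytes m hm]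

-- A's loop body, named
def pvStepA (s : Int) : Int :=
  let s1 := pvPruneA (pvMixA s (s * 64))
  let s2 := pvPruneA (pvMixA s1 (PySem.Int.truncdiv s1 32))
  pvPruneA (pvMixA s2 (s2 * 2048))

theorem pvBodyA_eq (st : Int × List (Int × Int × Int)) (i : Int) :
    pvBodyA st i = (pvStepA st.1,
      st.2 ++ [(pvStepA st.1, PySem.Int.mod (pvStepA st.1) 10,
                PySem.Int.mod (pvStepA st.1) 10 - PySem.Int.mod st.1 10)]) := rfl

theorem pvModM_eq_emod (s : Int) : PySem.Int.mod s 16777216 = s % 16777216 :=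
  PySem.Int.mod_eq_emod_of_pos (by norm_num)

-- A's composite step equals natLin of the low 24 bits
theorem pvStepA_eq (s : Int) : pvStepA s = ((natLin ((s % 16777216).toNat) : Nat) : Int) := by
  unfold pvStepA pvMixA pvPruneA natLin
  simp only
  set m : Nat := (s % 16777216).toNat with hm
  -- stage 1
  have st1 : PySem.Int.mod (PySem.Int.bxor (s * 64) s) 16777216
      = (((m ^^^ m <<< 6) &&& 16777215 : Nat) : Int) := by
    rw [pvModM_eq_emod, pvBxorEmod]
    have h64 : ((s*64) % 16777216).toNat = (m <<< 6) % 16777216 := by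
      have hs : (m <<< 6 : Nat) = m * 64 := by
        have := Nat.shiftLeft_eq m 6; norm_num at this; exact this
      have hmul : (s*64) % 16777216 = ((s % 16777216)*64) % 16777216 := by
        rw [Int.mul_emod s 64 16777216]
        rw [Int.mul_emod (s % 16777216) 64 16777216, Int.emod_emod_of_dvd _ (by norm_num)]
      rw [hs, hmul]; omega
    have hmm : (s % 16777216).toNat = m := rfl
    rw [h64, hmm]
    congr 1
    have hmask : (m ^^^ m <<< 6) &&& 16777215 = (m ^^^ m <<< 6) % 16777216 := by
      have := Nat.and_two_pow_sub_one_eq_mod (m ^^^ m <<< 6) 24; norm_num at this; exact this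
    rw [hmask, pvXmod, Nat.mod_eq_of_lt (show m < 16777216 by omega), Nat.xor_comm]
  rw [st1]
  set n1 : Nat := (m ^^^ m <<< 6) &&& 16777215 with hn1
  have hn1lt : n1 < 16777216 := by
    have := Nat.and_le_right (n := m ^^^ m <<< 6) (m := 16777215); omega
  -- stage 2
  have htd : PySem.Int.truncdiv ((n1:Nat):Int) 32 = ((n1 / 32 : Nat) : Int) := rfl
  have hdivshr : (n1 / 32 : Nat) = n1 >>> 5 := by
    have := Nat.shiftRight_eq_div_pow n1 5; norm_num at this; omega
  have st2 : PySem.Int.mod (PySem.Int.bxor (PySem.Int.truncdiv ((n1:Nat):Int) 32) ((n1:Nat):Int)) 16777216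
      = ((n1 ^^^ n1 >>> 5 : Nat) : Int) := by
    rw [htd, hdivshr, pvModM_eq_emod, pvBxorEmod]
    have hshrlt : n1 >>> 5 < 16777216 := by have := Nat.shiftRight_le n1 5; omega
    have e1 : (((n1 >>> 5 : Nat) : Int) % 16777216).toNat = n1 >>> 5 := by omega
    have e2 : (((n1 : Nat) : Int) % 16777216).toNat = n1 := by omega
    rw [e1, e2, Nat.xor_comm]
  rw [st2]
  set n2 : Nat := n1 ^^^ n1 >>> 5 with hn2
  have hn2lt : n2 < 16777216 := by
    have hM : (16777216:Nat) = 2^24 := by norm_num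
    rw [hM]
    exact Nat.xor_lt_two_pow (by omega) (by have := Nat.shiftRight_le n1 5; omega)
  -- stage 3
  rw [pvModM_eq_emod, pvBxorEmod]
  have h2048 : ((((n2:Nat):Int)*2048) % 16777216).toNat = (n2 <<< 11) % 16777216 := by
    have hs : (n2 <<< 11 : Nat) = n2 * 2048 := by
      have := Nat.shiftLeft_eq n2 11; norm_num at this; exact this
    have hc : ((n2:Nat):Int)*2048 = ((n2 * 2048 : Nat) : Int) := by push_cast; ring
    rw [hs, hc]; omega
  have e2 : (((n2 : Nat) : Int) % 16777216).toNat = n2 := by omega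
  rw [h2048, e2]
  congr 1
  have hmask : (n2 ^^^ n2 <<< 11) &&& 16777215 = (n2 ^^^ n2 <<< 11) % 16777216 := by
    have := Nat.and_two_pow_sub_one_eq_mod (n2 ^^^ n2 <<< 11) 24; norm_num at this; exact this
  rw [hmask, pvXmod, Nat.mod_eq_of_lt hn2lt, Nat.xor_comm]

-- the two steps agree: A's arithmetic step = B's table step on the reduced state
theorem pvStep_agree (s : Int) : pvStepA s = pvStepTab (PySem.Int.mod s 16777216) := by
  have hm : (s % 16777216).toNat < 16777216 := by omega
  have hcast : PySem.Int.mod s 16777216 = (((s % 16777216).toNat : Nat) : Int) := by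
    rw [pvModM_eq_emod]; omega
  rw [hcast, pvStepTab_natCast _ hm, pvStepA_eq]

theorem pvStepA_range (s : Int) : 0 ≤ pvStepA s ∧ pvStepA s < 16777216 := by
  rw [pvStepA_eq]
  have := natLin_lt ((s % 16777216).toNat)
  constructor
  · positivity
  · exact_mod_cast this

-- the loops agree
theorem pvLoop_agree (l : List Int) (s : Int) (out : List (Int × Int × Int)) :
    (l.foldl pvBodyA (s, out)).2
      = pvLoopB l.length (PySem.Int.mod s 16777216) (PySem.Int.mod s 10) out := by
  induction l generalizing s out with
  | nil => simp [pvLoopB]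
  | cons x xs ih =>
    simp only [List.foldl_cons, pvBodyA_eq, List.length_cons]
    rw [ih]
    have hrange := pvStepA_range s
    have hself : PySem.Int.mod (pvStepA s) 16777216 = pvStepA s := by
      rw [pvModM_eq_emod]
      exact Int.emod_eq_of_lt hrange.1 hrange.2
    rw [pvStep_agree s] at hself
    simp only [pvLoopB, pvStep_agree s, hself]

-- ===== VERDICT (by name: the statement is the Claim_ definition above) =====
theorem generate_secrets_spec : Claim_equal_generate_secrets := by
  intro initial num _
  unfold Spec_generate_secrets generate_secrets generate_secrets_alt
  rw [pvLoop_agree, PySem.List.length_pyRange_one]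
  norm_num
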